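-- pv_equiv track=rewrite | github.com/prdwaram/The_Local_Guide | main.py | search_context
-- ===== SOURCE A (Python) =====
-- def search_context(query, context):
--     """Simple keyword-based search in context"""
--     query_lower = query.lower()
--     lines = context.split('\n')
--
--     relevant_sections = []
--     current_section = []
--     section_header = ""
--
--     for line in lines:
--         # Track section headers
--         if line.startswith('##'):
--             if current_section and any(query_lower in l.lower() for l in current_section):
--                 relevant_sections.append((section_header, current_section))
--             section_header = line
--             current_section = [line]
--         else:
--             current_section.append(line)
--
--     # Check last section
--     if current_section and any(query_lower in l.lower() for l in current_section):
--         relevant_sections.append((section_header, current_section))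
--
--     return relevant_sections
-- ===== SOURCE B (Python) =====
-- def search_context(query, context):
--     """Simple keyword-based search in context"""
--     q = query.lower()
--     lines = context.split('\n')
--     # Pass 1: cut the line list into sections at '##' headers (index-based segmentation).
--     sections = []
--     i, n = 0, len(lines)
--     while i < n:
--         j = i + 1
--         while j < n and not lines[j].startswith('##'):
--             j += 1
--         header = lines[i] if lines[i].startswith('##') else ""
--         sections.append((header, lines[i:j]))
--         i = j
--     # Pass 2: keep the sections containing the query (case-insensitive).
--     return [(h, ls) for h, ls in sections if any(q in l.lower() for l in ls)]
-- ===== Notes on version B (the rewrite author's own statement) =====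
-- stated objective: alternative
-- what changed: B replaces A's accumulator loop with per-line flush logic by index-based segmentation: it cuts the line list into sections at '##' boundaries in one pass, then filters whole sections by the keyword in a second pass.
import Mathlib
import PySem

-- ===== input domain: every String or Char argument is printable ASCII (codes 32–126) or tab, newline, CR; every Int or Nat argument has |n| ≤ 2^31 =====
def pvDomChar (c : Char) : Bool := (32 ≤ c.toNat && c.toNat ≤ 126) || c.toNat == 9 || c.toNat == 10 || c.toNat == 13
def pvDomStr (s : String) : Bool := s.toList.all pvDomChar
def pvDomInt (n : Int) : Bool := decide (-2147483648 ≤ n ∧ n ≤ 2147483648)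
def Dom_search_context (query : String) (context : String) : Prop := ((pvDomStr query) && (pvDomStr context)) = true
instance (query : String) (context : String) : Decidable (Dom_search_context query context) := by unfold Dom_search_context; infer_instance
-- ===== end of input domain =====

-- B replaces A's accumulator loop (flush-at-each-header) by index-based segmentation into
-- sections followed by a separate keyword filter; alternative decomposition, same cost.

-- shared helper: any(query_lower in l.lower() for l in ls)
def scMatch (q : String) (ls : List String) : Bool :=
  ls.any (fun l => PySem.Str.isIn q (PySem.Str.lower l))

-- ===== PORT A =====
-- loop body of A: state = (relevant_sections, current_section, section_header)
def scStepA (q : String)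
    (st : List (String × List String) × List String × String) (line : String) :
    List (String × List String) × List String × String :=
  match st with
  | (rs, cur, hdr) =>
    if PySem.Str.startswith line "##" then
      ((if !cur.isEmpty && scMatch q cur then rs ++ [(hdr, cur)] else rs), [line], line)
    else
      (rs, cur ++ [line], hdr)

def search_context (query : String) (context : String) : List (String × List String) :=
  let q := PySem.Str.lower query
  let lines := (PySem.Str.split? context "\n").getD []
  let st := lines.foldl (scStepA q) ([], [], "")
  if !st.2.1.isEmpty && scMatch q st.2.1 then st.1 ++ [(st.2.2, st.2.1)] else st.1

-- ===== PORT B =====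
-- segmentation pass: cut the line list at '##' boundaries (the while-loop over indices in Source B)
def scSplit : List String → List (String × List String)
  | [] => []
  | l :: rest =>
    ((if PySem.Str.startswith l "##" then l else ""),
      l :: rest.takeWhile (fun x => !PySem.Str.startswith x "##"))
      :: scSplit (rest.dropWhile (fun x => !PySem.Str.startswith x "##"))
termination_by ls => ls.length
decreasing_by
  have := (List.dropWhile_sublist (l := rest)
    (p := fun x => !PySem.Str.startswith x "##")).length_le
  simp only [List.length_cons]; omega

def search_context_alt (query : String) (context : String) : List (String × List String) :=
  let q := PySem.Str.lower query
  (scSplit ((PySem.Str.split? context "\n").getD [])).filter (fun s => scMatch q s.2)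

-- ===== PRECONDITION & SPEC =====
def Spec_search_context (query : String) (context : String) (out : List (String × List String)) : Prop := out = search_context_alt query context
instance (query : String) (context : String) (out : List (String × List String)) : Decidable (Spec_search_context query context out) := by unfold Spec_search_context; infer_instance

-- ===== CLAIM (what is proved, stated in full; the proofs are below) =====
def Claim_equal_search_context : Prop := ∀ (query : String) (context : String), Dom_search_context query context → Spec_search_context query context (search_context query context)

-- ===== LEMMAS AND PROOFS =====

@[simp] theorem scSplit_nil : scSplit [] = [] := by rw [scSplit.eq_def]

theorem scSplit_cons (l : String) (rest : List String) :
    scSplit (l :: rest) =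
      ((if PySem.Str.startswith l "##" then l else ""),
        l :: rest.takeWhile (fun x => !PySem.Str.startswith x "##"))
        :: scSplit (rest.dropWhile (fun x => !PySem.Str.startswith x "##")) := by
  rw [scSplit.eq_def]

-- A's pending-section semantics, expressed structurally: sections of `lines` with pending
-- section (hdr, cur) still open.
def secsFrom (hdr : String) (cur : List String) : List String → List (String × List String)
  | [] => if cur.isEmpty then [] else [(hdr, cur)]
  | l :: ls =>
    if PySem.Str.startswith l "##" then
      (if cur.isEmpty then [] else [(hdr, cur)]) ++ secsFrom l [l] ls
    else
      secsFrom hdr (cur ++ [l]) ls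

theorem secsFrom_ne_nil (lines : List String) :
    ∀ hdr cur, cur ≠ [] →
      secsFrom hdr cur lines =
        (hdr, cur ++ lines.takeWhile (fun x => !PySem.Str.startswith x "##"))
          :: scSplit (lines.dropWhile (fun x => !PySem.Str.startswith x "##")) := by
  induction lines with
  | nil => intro hdr cur h; simp only [secsFrom, scSplit_nil, List.takeWhile_nil,
      List.dropWhile_nil, List.isEmpty_iff, h, if_false, List.append_nil]
  | cons l ls ih =>
    intro hdr cur h
    by_cases hl : PySem.Str.startswith l "##"
    · simp only [secsFrom, hl, if_true, List.takeWhile_cons, List.dropWhile_cons,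
        Bool.not_true, Bool.false_eq_true, if_false, List.isEmpty_iff, h,
        scSplit_cons, ih l [l] (by simp)]
      simp
    · simp only [secsFrom, hl, Bool.false_eq_true, if_false, List.takeWhile_cons,
        List.dropWhile_cons, Bool.not_false, if_true,
        ih hdr (cur ++ [l]) (by simp)]
      simp

theorem secsFrom_nil_eq_scSplit (lines : List String) :
    secsFrom "" [] lines = scSplit lines := by
  cases lines with
  | nil => simp [secsFrom]
  | cons l ls =>
    by_cases hl : PySem.Str.startswith l "##"
    · simp only [secsFrom, hl, if_true, List.isEmpty_nil, scSplit_cons,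
        secsFrom_ne_nil ls l [l] (by simp), List.singleton_append, List.nil_append]
    · simp only [secsFrom, hl, Bool.false_eq_true, if_false, scSplit_cons,
        List.nil_append, secsFrom_ne_nil ls "" [l] (by simp), List.singleton_append]

theorem foldl_scStepA (q : String) (lines : List String) :
    ∀ (rs : List (String × List String)) (cur : List String) (hdr : String),
      (if !(lines.foldl (scStepA q) (rs, cur, hdr)).2.1.isEmpty
            && scMatch q (lines.foldl (scStepA q) (rs, cur, hdr)).2.1 then
         (lines.foldl (scStepA q) (rs, cur, hdr)).1
           ++ [((lines.foldl (scStepA q) (rs, cur, hdr)).2.2,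
                (lines.foldl (scStepA q) (rs, cur, hdr)).2.1)]
       else (lines.foldl (scStepA q) (rs, cur, hdr)).1)
      = rs ++ (secsFrom hdr cur lines).filter (fun s => scMatch q s.2) := by
  induction lines with
  | nil =>
    intro rs cur hdr
    cases hc : cur.isEmpty <;> simp only [secsFrom, hc] <;>
      cases hm : scMatch q cur <;> simp [hm, hc]
  | cons l ls ih =>
    intro rs cur hdr
    by_cases hl : PySem.Str.startswith l "##"
    · simp only [List.foldl_cons, scStepA, hl, if_pos]
      rw [ih]
      simp only [secsFrom, hl, if_pos, List.filter_append]
      cases hc : cur.isEmpty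
      · cases hm : scMatch q cur <;> simp [hm]
      · simp
    · simp only [List.foldl_cons, scStepA, hl]
      rw [ih]
      simp at hl
      simp [secsFrom, hl]

-- ===== VERDICT (by name: the statement is the Claim_ definition above) =====
theorem search_context_spec : Claim_equal_search_context := by
  intro query context _
  unfold Spec_search_context search_context search_context_alt
  rw [foldl_scStepA, secsFrom_nil_eq_scSplit]
  simp
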